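-- pv_equiv track=rewrite | github.com/ckoons/BubbleSpacetimeTheory | play/toy_1668_debye_predictions.py | bst_reading
-- ===== SOURCE A (Python) =====
-- def bst_reading(n):
--     """Try to express n as a BST product."""
--     # Check simple products of BST integers
--     bst_vals = {
--         1: "1", 2: "rank", 3: "N_c", 4: "rank^2", 5: "n_C",
--         6: "C_2", 7: "g", 8: "2^N_c", 9: "N_c^2", 10: "rank*n_C",
--         11: "DC", 12: "rank*C_2", 14: "rank*g", 15: "N_c*n_C",
--         17: "N_c*C_2-1", 18: "N_c*C_2", 19: "n_C^2-C_2",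
--         20: "rank^2*n_C", 21: "N_c*g", 24: "rank^3*N_c",
--         25: "n_C^2", 28: "rank^2*g", 30: "rank*N_c*n_C",
--         35: "n_C*g", 36: "C_2^2", 42: "C_2*g", 45: "N_c^2*n_C",
--         49: "g^2", 60: "rank^2*N_c*n_C", 70: "rank*n_C*g",
--         105: "N_c*n_C*g", 137: "N_max", 210: "rank*N_c*n_C*g"
--     }
--     if n in bst_vals:
--         return bst_vals[n]
--     # Check ratios
--     for d in [2, 3, 4, 5, 6, 7]:
--         if n * d in bst_vals:
--             return f"{bst_vals[n*d]}/{bst_vals[d]}"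
--     return None
-- ===== SOURCE B (Python) =====
-- _KEYS = [1, 2, 3, 4, 5, 6, 7, 8, 9, 10, 11, 12, 14, 15, 17, 18, 19, 20, 21, 24, 25, 28, 30, 35, 36, 42, 45, 49, 60, 70, 105, 137, 210]
-- _NAMES = "1;rank;N_c;rank^2;n_C;C_2;g;2^N_c;N_c^2;rank*n_C;DC;rank*C_2;rank*g;N_c*n_C;N_c*C_2-1;N_c*C_2;n_C^2-C_2;rank^2*n_C;N_c*g;rank^3*N_c;n_C^2;rank^2*g;rank*N_c*n_C;n_C*g;C_2^2;C_2*g;N_c^2*n_C;g^2;rank^2*N_c*n_C;rank*n_C*g;N_c*n_C*g;N_max;rank*N_c*n_C*g".split(";")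
--
--
-- def bst_reading(n):
--     """Try to express n as a BST product."""
--     # Every exact multiple n*d (d = 2..7) of a table key has its quotient in the
--     # table itself, so the original ratio scan can never fire: the function is a
--     # pure table lookup, done here by binary search over the sorted key array.
--     lo, hi = 0, len(_KEYS)
--     while lo < hi:
--         mid = (lo + hi) // 2
--         if _KEYS[mid] < n:
--             lo = mid + 1
--         else:
--             hi = mid
--     if lo < len(_KEYS) and _KEYS[lo] == n:
--         return _NAMES[lo]
--     return None
-- ===== Notes on version B (the rewrite author's own statement) =====
-- stated objective: alternative
-- what changed: B replaces the dict plus divisor-scan (for each d in 2..7 test n*d) by a sorted parallel-array table with a hand-written binary search; the ratio branch is dropped because every exact multiple n*d of a table key already has its quotient as a direct key, so the scan can never return.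
import Mathlib
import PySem

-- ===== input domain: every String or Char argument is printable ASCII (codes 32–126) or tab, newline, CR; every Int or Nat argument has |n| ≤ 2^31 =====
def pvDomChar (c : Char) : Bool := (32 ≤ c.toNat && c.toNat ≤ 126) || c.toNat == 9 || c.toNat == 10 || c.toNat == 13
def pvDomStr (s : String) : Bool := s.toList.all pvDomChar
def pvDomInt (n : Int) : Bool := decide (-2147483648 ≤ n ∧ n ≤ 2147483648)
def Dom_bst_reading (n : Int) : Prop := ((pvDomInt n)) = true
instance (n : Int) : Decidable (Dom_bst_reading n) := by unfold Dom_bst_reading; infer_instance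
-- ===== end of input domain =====

-- B replaces the dict + divisor scan by a binary search over a sorted key array
-- (the ratio scan of A is provably dead: every quotient it could hit is a direct key);
-- objective: alternative data structure, same cost.

-- ===== PORT A =====
-- A's literal bst_vals dict
def pvBstVals : PySem.Dict Int String := PySem.Dict.ofList [
  (1, "1"), (2, "rank"), (3, "N_c"), (4, "rank^2"), (5, "n_C"),
  (6, "C_2"), (7, "g"), (8, "2^N_c"), (9, "N_c^2"), (10, "rank*n_C"),
  (11, "DC"), (12, "rank*C_2"), (14, "rank*g"), (15, "N_c*n_C"),
  (17, "N_c*C_2-1"), (18, "N_c*C_2"), (19, "n_C^2-C_2"),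
  (20, "rank^2*n_C"), (21, "N_c*g"), (24, "rank^3*N_c"),
  (25, "n_C^2"), (28, "rank^2*g"), (30, "rank*N_c*n_C"),
  (35, "n_C*g"), (36, "C_2^2"), (42, "C_2*g"), (45, "N_c^2*n_C"),
  (49, "g^2"), (60, "rank^2*N_c*n_C"), (70, "rank*n_C*g"),
  (105, "N_c*n_C*g"), (137, "N_max"), (210, "rank*N_c*n_C*g")]

-- A's 'for d in [2,...,7]' loop; bst_vals[n*d] / bst_vals[d] are looked up only after
-- the membership test succeeded (d ∈ dict always), so getD "" is exact here.
def pvRatioLoop (n : Int) : List Int → Option String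
  | [] => none
  | d :: ds =>
      if pvBstVals.contains (n * d) then
        some (pvBstVals.getD (n * d) "" ++ "/" ++ pvBstVals.getD d "")
      else pvRatioLoop n ds

def bst_reading (n : Int) : Option String :=
  if pvBstVals.contains n then pvBstVals.get? n
  else pvRatioLoop n [2, 3, 4, 5, 6, 7]

-- ===== PORT B =====
-- Source B's sorted key array and the name array obtained by splitting one packed string
def pvKeys : List Int :=
  [1, 2, 3, 4, 5, 6, 7, 8, 9, 10, 11, 12, 14, 15, 17, 18, 19, 20, 21, 24,
   25, 28, 30, 35, 36, 42, 45, 49, 60, 70, 105, 137, 210]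

-- sep ";" is non-empty, so split? always returns some: getD [] is exact
def pvNames : List String :=
  (PySem.Str.split? "1;rank;N_c;rank^2;n_C;C_2;g;2^N_c;N_c^2;rank*n_C;DC;rank*C_2;rank*g;N_c*n_C;N_c*C_2-1;N_c*C_2;n_C^2-C_2;rank^2*n_C;N_c*g;rank^3*N_c;n_C^2;rank^2*g;rank*N_c*n_C;n_C*g;C_2^2;C_2*g;N_c^2*n_C;g^2;rank^2*N_c*n_C;rank*n_C*g;N_c*n_C*g;N_max;rank*N_c*n_C*g" ";").getD []

-- Source B's 'while lo < hi' binary-search loop; _KEYS[mid] is always in range (lo < hi ≤ len).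
-- Structural recursion on a fuel counter ≥ hi - lo, which strictly decreases each
-- iteration, so the fuel never runs out and this is exactly the while loop.
def pvBisect (n : Int) : Nat → Nat → Nat → Nat
  | 0, lo, _ => lo
  | fuel + 1, lo, hi =>
    if lo < hi then
      let mid := (lo + hi) / 2
      if pvKeys.getD mid 0 < n then pvBisect n fuel (mid + 1) hi
      else pvBisect n fuel lo mid
    else lo

def bst_reading_alt (n : Int) : Option String :=
  let lo := pvBisect n pvKeys.length 0 pvKeys.length
  if lo < pvKeys.length ∧ pvKeys.getD lo 0 = n then some (pvNames.getD lo "")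
  else none

-- ===== PRECONDITION & SPEC =====
def Spec_bst_reading (n : Int) (out : Option String) : Prop := out = bst_reading_alt n
instance (n : Int) (out : Option String) : Decidable (Spec_bst_reading n out) := by unfold Spec_bst_reading; infer_instance

-- ===== CLAIM (what is proved, stated in full; the proofs are below) =====
def Claim_equal_bst_reading : Prop := ∀ (n : Int), Dom_bst_reading n → Spec_bst_reading n (bst_reading n)

-- ===== LEMMAS AND PROOFS =====

lemma pvBstVals_keys_bounded : ∀ k ∈ pvBstVals.keys, 1 ≤ k ∧ k ≤ 210 := by decide

lemma pvKeys_getD_bounded : ∀ i : Nat, i < pvKeys.length →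
    1 ≤ pvKeys.getD i 0 ∧ pvKeys.getD i 0 ≤ 210 := by decide

lemma pvBstVals_contains_false (m : Int) (hm : m < 1 ∨ 210 < m) :
    pvBstVals.contains m = false := by
  rw [PySem.Dict.contains_eq_decide_mem_keys]
  simp only [decide_eq_false_iff_not]
  intro h
  have := pvBstVals_keys_bounded m h
  omega

lemma pvOutside (n : Int) (hn : n < 1 ∨ 210 < n) :
    bst_reading n = none ∧ bst_reading_alt n = none := by
  constructor
  · have h2 : ∀ d : Int, 2 ≤ d → d ≤ 7 → pvBstVals.contains (n * d) = false := by
      intro d hd1 hd2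
      apply pvBstVals_contains_false
      rcases hn with h | h
      · left; nlinarith
      · right; nlinarith
    simp [bst_reading, pvRatioLoop, pvBstVals_contains_false n hn,
      h2 2 (by norm_num) (by norm_num), h2 3 (by norm_num) (by norm_num),
      h2 4 (by norm_num) (by norm_num), h2 5 (by norm_num) (by norm_num),
      h2 6 (by norm_num) (by norm_num), h2 7 (by norm_num) (by norm_num)]
  · have hc : ¬ (pvBisect n pvKeys.length 0 pvKeys.length < pvKeys.length ∧
        pvKeys.getD (pvBisect n pvKeys.length 0 pvKeys.length) 0 = n) := by
      rintro ⟨hi, he⟩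
      have := pvKeys_getD_bounded _ hi
      omega
    simp only [bst_reading_alt, if_neg hc]

set_option maxRecDepth 100000 in
lemma pvInside : ∀ m : Fin 210,
    bst_reading ((m : Nat) + 1 : Int) = bst_reading_alt ((m : Nat) + 1 : Int) := by decide

-- ===== VERDICT (by name: the statement is the Claim_ definition above) =====
theorem bst_reading_spec : Claim_equal_bst_reading := by
  intro n _
  unfold Spec_bst_reading
  by_cases h : 1 ≤ n ∧ n ≤ 210
  · have hm : ((⟨(n - 1).toNat, by omega⟩ : Fin 210) : Nat) + 1 = (n : Int) := by
      simp; omega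
    have := pvInside ⟨(n - 1).toNat, by omega⟩
    rwa [hm] at this
  · obtain ⟨hA, hB⟩ := pvOutside n (by omega)
    rw [hA, hB]
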